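-- pv_equiv track=rewrite | github.com/windard/ModernCryptography | projecteuler/quiz173.py | big_calculate_upper
-- ===== SOURCE A (Python) =====
-- def square_tile_num(hole=2, level=1):
--     return sum([4*((hole+2*i)+1) for i in range(level)])
--
-- def big_calculate_upper(n=100):
--     result = []
--     i = 1
--     while True:
--         j = 1
--         at_least_one = False
--         while True:
--             if square_tile_num(j, i) <= n:
--                 result.append((j, i))
--                 j += 1
--                 at_least_one = True
--             else:
--                 break
--         if at_least_one:
--             i += 1
--         else:
--             break
--     return result
-- ===== SOURCE B (Python) =====
-- def big_calculate_upper(n=100):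
--     # square_tile_num(j, i) == 4*i*(j+i) in closed form, so for each level i
--     # the largest admissible hole is jmax = n // (4*i) - i; a level exists
--     # at all iff jmax >= 1, i.e. 4*i*(i+1) <= n.
--     result = []
--     i = 1
--     while 4 * i * (i + 1) <= n:
--         jmax = n // (4 * i) - i
--         result.extend((j, i) for j in range(1, jmax + 1))
--         i += 1
--     return result
-- ===== Notes on version B (the rewrite author's own statement) =====
-- stated objective: faster
-- what changed: Replaces A's per-pair recomputation of square_tile_num (a sum over the level) and its pair-by-pair inner while loop by the quadratic closed form: for each level i the largest hole is computed directly by one floor division and the whole row is emitted at once.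
import Mathlib
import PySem

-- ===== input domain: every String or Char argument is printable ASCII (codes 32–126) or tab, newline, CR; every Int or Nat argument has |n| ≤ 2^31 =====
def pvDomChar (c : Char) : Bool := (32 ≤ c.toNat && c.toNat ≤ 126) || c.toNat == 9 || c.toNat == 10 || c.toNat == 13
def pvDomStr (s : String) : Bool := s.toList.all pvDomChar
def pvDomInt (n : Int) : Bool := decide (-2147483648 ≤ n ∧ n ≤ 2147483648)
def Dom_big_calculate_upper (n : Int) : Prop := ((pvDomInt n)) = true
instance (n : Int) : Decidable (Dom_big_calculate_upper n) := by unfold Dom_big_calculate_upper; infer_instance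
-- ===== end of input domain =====

-- B replaces A's per-pair evaluation of square_tile_num by its quadratic closed form,
-- computing each level's largest hole directly by one floor division and
-- emitting the whole row at once (objective: a better algorithm).

-- ===== PORT A =====
-- sum([4*((hole+2*i)+1) for i in range(level)])
def square_tile_num (hole level : Int) : Int :=
  (((PySem.List.pyRange 0 level 1).map (fun i => 4*((hole + 2*i) + 1)))).sum

-- the inner 'while True' of A; fuel is only a totality guard (always sufficient on runs we claim about)
def pvInnerA (n i : Int) : Nat → Int → List (Int × Int) → Bool → (List (Int × Int) × Bool)
  | 0, _, acc, al => (acc, al)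
  | f+1, j, acc, al =>
    if square_tile_num j i ≤ n then pvInnerA n i f (j+1) (acc ++ [(j, i)]) true
    else (acc, al)

-- the outer 'while True' of A; same fuel remark
def pvOuterA (n : Int) : Nat → Int → List (Int × Int) → List (Int × Int)
  | 0, _, acc => acc
  | f+1, i, acc =>
    let r := pvInnerA n i (n.toNat + 2) 1 acc false
    if r.2 then pvOuterA n f (i+1) r.1 else r.1

def big_calculate_upper (n : Int) : List (Int × Int) :=
  pvOuterA n (n.toNat + 2) 1 []

-- ===== PORT B =====
-- result.extend((j, i) for j in range(1, jmax + 1))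
def pvRowB (i jmax : Int) : List (Int × Int) :=
  (PySem.List.pyRange 1 (jmax + 1) 1).map (fun j => (j, i))

-- the 'while 4*i*(i+1) <= n' loop of B; fuel is only a totality guard
def pvLoopB (n : Int) : Nat → Int → List (Int × Int) → List (Int × Int)
  | 0, _, acc => acc
  | f+1, i, acc =>
    if 4*i*(i+1) ≤ n then
      pvLoopB n f (i+1) (acc ++ pvRowB i (PySem.Int.floordiv n (4*i) - i))
    else acc

def big_calculate_upper_alt (n : Int) : List (Int × Int) :=
  pvLoopB n (n.toNat + 2) 1 []

-- ===== PRECONDITION & SPEC =====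
def Spec_big_calculate_upper (n : Int) (out : List (Int × Int)) : Prop := out = big_calculate_upper_alt n
instance (n : Int) (out : List (Int × Int)) : Decidable (Spec_big_calculate_upper n out) := by unfold Spec_big_calculate_upper; infer_instance

-- ===== CLAIM (what is proved, stated in full; the proofs are below) =====
def Claim_equal_big_calculate_upper : Prop := ∀ (n : Int), Dom_big_calculate_upper n → Spec_big_calculate_upper n (big_calculate_upper n)

-- ===== LEMMAS AND PROOFS =====

-- square_tile_num in closed form
theorem sq_closed_nat (hole : Int) (m : Nat) :
    square_tile_num hole (m : Int) = 4 * (m : Int) * (hole + m) := by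
  unfold square_tile_num
  rw [PySem.List.pyRange_one]
  simp only [sub_zero, Int.toNat_natCast]
  induction m with
  | zero => simp
  | succ k ih =>
    rw [List.range_succ, List.map_append, List.map_append, List.sum_append, ih]
    simp only [List.map_cons, List.map_nil, List.sum_cons, List.sum_nil]
    push_cast
    ring

theorem sq_closed (hole i : Int) (hi : 0 ≤ i) :
    square_tile_num hole i = 4 * i * (hole + i) := by
  have : i = (i.toNat : Int) := by omega
  rw [this, sq_closed_nat]

-- the inner-loop condition, as a bound on j
theorem cond_iff (n i j : Int) (hi : 1 ≤ i) :
    square_tile_num j i ≤ n ↔ j ≤ PySem.Int.floordiv n (4*i) - i := by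
  have h4i : (0:Int) < 4*i := by omega
  rw [sq_closed j i (by omega)]
  rw [show (j ≤ PySem.Int.floordiv n (4*i) - i) ↔ (j + i ≤ PySem.Int.floordiv n (4*i)) by omega]
  rw [PySem.Int.le_floordiv_iff_mul_le h4i]
  constructor <;> intro h <;> nlinarith

-- fuel bound for the inner loop
theorem jmax_toNat_lt (n i : Int) (hi : 1 ≤ i) :
    (PySem.Int.floordiv n (4*i) - i + 1 - 1).toNat < n.toNat + 2 := by
  have h4i : (0:Int) < 4*i := by omega
  set q := PySem.Int.floordiv n (4*i) with hq
  have hqle : q * (4*i) ≤ n := by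
    rw [hq]
    exact (PySem.Int.le_floordiv_iff_mul_le h4i).mp le_rfl
  by_cases hq0 : q ≤ 0
  · omega
  · have h1q : 1 ≤ q := by omega
    have : q ≤ q * (4*i) := by nlinarith
    omega

theorem inner_eq (n i : Int) (hi : 1 ≤ i) :
    ∀ (f : Nat) (j : Int) (acc : List (Int × Int)) (al : Bool), 1 ≤ j →
      (PySem.Int.floordiv n (4*i) - i + 1 - j).toNat < f →
      pvInnerA n i f j acc al =
        (acc ++ (PySem.List.pyRange j (PySem.Int.floordiv n (4*i) - i + 1) 1).map (fun k => (k, i)),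
         al || decide (j ≤ PySem.Int.floordiv n (4*i) - i)) := by
  intro f
  induction f with
  | zero => intro j acc al _ hf; omega
  | succ f ih =>
    intro j acc al hj hf
    set jmax := PySem.Int.floordiv n (4*i) - i with hjm
    show pvInnerA n i (f+1) j acc al = _
    unfold pvInnerA
    by_cases hc : square_tile_num j i ≤ n
    · have hjle : j ≤ jmax := (cond_iff n i j hi).mp hc
      rw [if_pos hc]
      rw [ih (j+1) (acc ++ [(j, i)]) true (by omega) (by omega)]
      rw [PySem.List.pyRange_one_cons (by omega : j < jmax + 1)]
      simp [hjle]
    · have hjgt : ¬ j ≤ jmax := fun h => hc ((cond_iff n i j hi).mpr h)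
      rw [if_neg hc]
      rw [PySem.List.pyRange_one_eq_nil (by omega : jmax + 1 ≤ j)]
      simp [hjgt]

-- the outer-loop guard, as B writes it
theorem guard_iff (n i : Int) (hi : 1 ≤ i) :
    (1 ≤ PySem.Int.floordiv n (4*i) - i) ↔ 4*i*(i+1) ≤ n := by
  have h4i : (0:Int) < 4*i := by omega
  rw [show (1 ≤ PySem.Int.floordiv n (4*i) - i) ↔ (i + 1 ≤ PySem.Int.floordiv n (4*i)) by omega]
  rw [PySem.Int.le_floordiv_iff_mul_le h4i]
  constructor <;> intro h <;> nlinarith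

theorem outer_eq (n : Int) :
    ∀ (f : Nat) (i : Int) (acc : List (Int × Int)), 1 ≤ i →
      (n + 1 - i).toNat < f →
      pvOuterA n f i acc = pvLoopB n f i acc := by
  intro f
  induction f with
  | zero => intro i acc _ hf; omega
  | succ f ih =>
    intro i acc hi hf
    show pvOuterA n (f+1) i acc = pvLoopB n (f+1) i acc
    unfold pvOuterA pvLoopB
    rw [inner_eq n i hi (n.toNat + 2) 1 acc false (by omega) (jmax_toNat_lt n i hi)]
    set jmax := PySem.Int.floordiv n (4*i) - i with hjm
    by_cases hg : 4*i*(i+1) ≤ n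
    · have h1 : 1 ≤ jmax := (guard_iff n i hi).mpr hg
      have hin : i + 1 ≤ n := by nlinarith
      simp only [h1, decide_true, Bool.false_or, if_pos hg]
      rw [ih (i+1) _ (by omega) (by omega)]
      rfl
    · have h1 : ¬ (1 ≤ jmax) := fun h => hg ((guard_iff n i hi).mp h)
      simp only [if_neg hg]
      rw [PySem.List.pyRange_one_eq_nil (by omega : jmax + 1 ≤ 1)]
      simp [h1]

-- ===== VERDICT (by name: the statement is the Claim_ definition above) =====
theorem big_calculate_upper_spec : Claim_equal_big_calculate_upper := by
  intro n _
  unfold Spec_big_calculate_upper big_calculate_upper big_calculate_upper_alt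
  exact outer_eq n (n.toNat + 2) 1 [] (by omega) (by omega)
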